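-- pv_equiv track=rewrite | github.com/zoongahn/problem-solving-BOJ | Codeplus/alg-basics_1/Practice/10799.iron_stick.py | get_stick_num
-- ===== SOURCE A (Python) =====
-- def get_stick_num(s: str):
--     index_stack = []
--     result = 0
--     for i in range(len(s)):
--         char = s[i]
--         if char == "(":
--             index_stack.append(i)
--         elif char == ")":
--             if (i - index_stack[-1]) == 1:  # 레이저
--                 index_stack.pop()
--                 result += len(index_stack)
--             else:
--                 index_stack.pop()
--                 result += 1
--     return result
-- ===== SOURCE B (Python) =====
-- def get_stick_num(s: str):
--     # Stateless closed-form formulation: each index contributes independently.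
--     # A ')' preceded by '(' is a laser; it cuts every stick currently open around it,
--     # and that number equals the paren balance of the prefix minus one (the laser's own '(').
--     # Any other ')' ends a stick and yields exactly one final piece.
--     def piece(i):
--         if s[i] != ')':
--             return 0
--         if i > 0 and s[i - 1] == '(':
--             prefix = s[:i]
--             return prefix.count('(') - prefix.count(')') - 1
--         return 1
--     return sum(piece(i) for i in range(len(s)))
-- ===== Notes on version B (the rewrite author's own statement) =====
-- stated objective: alternative
-- what changed: Replaces the online stack simulation by a stateless sum of independent per-index contributions: each laser's contribution is computed as a closed-form prefix paren-balance (opening-count minus closing-count of the preceding prefix, minus one) instead of reading the length of a simulated stack, so no state is carried between iterations at all.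
-- outside the precondition, e.g. on get_stick_num(')'): A raises IndexError, B returns 1
import Mathlib
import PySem

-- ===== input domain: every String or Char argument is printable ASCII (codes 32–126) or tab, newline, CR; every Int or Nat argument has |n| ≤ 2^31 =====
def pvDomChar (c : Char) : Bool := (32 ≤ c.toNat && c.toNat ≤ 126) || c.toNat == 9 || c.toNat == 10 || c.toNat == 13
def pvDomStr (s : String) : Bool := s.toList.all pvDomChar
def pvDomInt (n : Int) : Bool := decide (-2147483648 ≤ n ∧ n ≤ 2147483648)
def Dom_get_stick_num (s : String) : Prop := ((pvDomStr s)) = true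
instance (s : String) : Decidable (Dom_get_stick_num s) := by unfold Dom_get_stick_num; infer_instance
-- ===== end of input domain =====

-- B replaces A's online stack simulation by a stateless sum of independent per-index
-- closed-form contributions (laser contribution = prefix paren balance - 1); objective: alternative.


-- ===== PORT A =====
-- the for-loop over i in range(len(s)) with char = s[i], carrying (index stack, result);
-- stack top = list head.  Where Python raises IndexError (a pop on an empty stack, excluded
-- by Pre_) the port reads headD 0 instead.
def loopA : List Char → Nat → List Int → Int → Int
  | [], _, _, result => result
  | c :: rest, i, stack, result =>
    if c = '(' then loopA rest (i + 1) ((i : Int) :: stack) result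
    else if c = ')' then
      if (i : Int) - stack.headD 0 = 1 then
        loopA rest (i + 1) stack.tail (result + (stack.tail.length : Int))
      else
        loopA rest (i + 1) stack.tail (result + 1)
    else loopA rest (i + 1) stack result

def get_stick_num (s : String) : Int := loopA s.toList 0 [] 0

-- ===== PORT B =====
-- piece(i): the independent contribution of index i.  s[i] and s[i-1] are in-range accesses
-- (0 ≤ i-1 < i < len(s)), ported exactly as getD with a dummy default never used.
def pieceB (cs : List Char) (i : Nat) : Int :=
  if cs.getD i ' ' ≠ ')' then 0
  else if 0 < i ∧ cs.getD (i - 1) ' ' = '(' then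
    ((cs.take i).count '(' : Int) - ((cs.take i).count ')' : Int) - 1
  else 1

-- sum(piece(i) for i in range(len(s)))
def get_stick_num_alt (s : String) : Int :=
  ((List.range s.toList.length).map (pieceB s.toList)).sum

-- ===== PRECONDITION & SPEC =====
-- Pre_ excludes exactly the strings on which A raises IndexError: those with a closing
-- parenthesis whose preceding prefix contains no unmatched opening parenthesis.
def Pre_get_stick_num (s : String) : Prop :=
  ∀ n, n ≤ s.toList.length → (s.toList.take n).count ')' ≤ (s.toList.take n).count '('
instance (s : String) : Decidable (Pre_get_stick_num s) := by unfold Pre_get_stick_num; infer_instance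

def pvWitness_get_stick_num : String := "()(((()(x))()"

def Spec_get_stick_num (s : String) (out : Int) : Prop := out = get_stick_num_alt s
instance (s : String) (out : Int) : Decidable (Spec_get_stick_num s out) := by unfold Spec_get_stick_num; infer_instance

-- ===== CLAIM (what is proved, stated in full; the proofs are below) =====
def Claim_equal_get_stick_num : Prop := ∀ (s : String), Dom_get_stick_num s → Pre_get_stick_num s → Spec_get_stick_num s (get_stick_num s)

-- ===== LEMMAS AND PROOFS =====

theorem loopA_cons (c : Char) (rest : List Char) (i : Nat) (stack : List Int) (result : Int) :
    loopA (c :: rest) i stack result =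
      (if c = '(' then loopA rest (i + 1) ((i : Int) :: stack) result
       else if c = ')' then
         if (i : Int) - stack.headD 0 = 1 then
           loopA rest (i + 1) stack.tail (result + (stack.tail.length : Int))
         else loopA rest (i + 1) stack.tail (result + 1)
       else loopA rest (i + 1) stack result) := rfl

theorem range'_map_sum (f : Nat → Int) (k n : Nat) :
    ((List.range' k (n + 1)).map f).sum = f k + ((List.range' (k + 1) n).map f).sum := by
  simp [List.range']

theorem loop_eq (cs : List Char)
    (hpre : ∀ n, n ≤ cs.length → (cs.take n).count ')' ≤ (cs.take n).count '(') :
    ∀ (l : List Char) (k : Nat) (stack : List Int) (result : Int),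
      cs.drop k = l →
      (stack.length + (cs.take k).count ')' = (cs.take k).count '(') →
      (∀ x ∈ stack, ∃ j : Nat, j < k ∧ x = (j : Int) ∧ cs[j]? = some '(') →
      (0 < k → cs[k - 1]? = some '(' → ∃ t, stack = ((k - 1 : Nat) : Int) :: t) →
      loopA l k stack result = result + ((List.range' k l.length).map (pieceB cs)).sum := by
  intro l
  induction l with
  | nil => intro k stack result _ _ _ _; simp [loopA]
  | cons c rest ih =>
    intro k stack result hdrop hcount hmem htop
    have hk : k < cs.length := by
      by_contra h
      rw [List.drop_eq_nil_of_le (by omega)] at hdrop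
      exact List.cons_ne_nil _ _ hdrop.symm
    have hck : cs[k]? = some c := by
      have h0 : (cs.drop k)[0]? = some c := by rw [hdrop]; rfl
      rw [List.getElem?_drop] at h0
      simpa using h0
    have hck' : cs.getD k ' ' = c := by
      simp [List.getD, hck]
    have hdrop' : cs.drop (k + 1) = rest := by
      have h : cs.drop (k + 1) = (cs.drop k).drop 1 := by rw [List.drop_drop]
      rw [h, hdrop]; rfl
    have htake : cs.take (k + 1) = cs.take k ++ [c] := by
      rw [List.take_add_one, hck]; rfl
    rw [loopA_cons, List.length_cons, range'_map_sum]
    by_cases hc : c = '('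
    · -- push; pieceB cs k = 0
      have hpz : pieceB cs k = 0 := by
        simp [pieceB, List.getD, hck, hc]
      rw [if_pos hc, hpz]
      have step := ih (k + 1) ((k : Int) :: stack) result hdrop'
        (by subst hc; simp [htake, List.count_append]; omega)
        (by
          intro x hx
          rw [List.mem_cons] at hx
          rcases hx with hx | hx
          · exact ⟨k, by omega, hx, by rw [hck, hc]⟩
          · obtain ⟨j, hj, hxj, hcj⟩ := hmem x hx
            exact ⟨j, by omega, hxj, hcj⟩)
        (by intro _ _; exact ⟨stack, by simp⟩)
      rw [step]; ring
    · by_cases hc2 : c = ')'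
      · -- pop: the stack is nonempty under Pre_
        rw [if_neg hc, if_pos hc2]
        have hne : stack ≠ [] := by
          intro h
          have hp := hpre (k + 1) (by omega)
          rw [htake] at hp
          subst hc2
          simp [List.count_append, h] at hcount hp
          omega
        obtain ⟨x, t, hst⟩ := List.exists_cons_of_ne_nil hne
        obtain ⟨j, hj, hxj, hcj⟩ := hmem x (by rw [hst]; exact List.mem_cons_self)
        have hprevD : ∀ (d : Char), 0 < k → (cs.getD (k - 1) ' ' = d ↔ cs[k - 1]? = some d) := by
          intro d hk0
          have : k - 1 < cs.length := by omega
          simp [List.getD, List.getElem?_eq_getElem this]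
        -- branch equivalence: A's index test ↔ B's previous-character test
        have hbr : ((k : Int) - stack.headD 0 = 1) ↔ (0 < k ∧ cs.getD (k - 1) ' ' = '(') := by
          constructor
          · intro h
            rw [hst] at h
            simp only [List.headD_cons, hxj] at h
            have hjk : j = k - 1 := by omega
            have hk0 : 0 < k := by omega
            exact ⟨hk0, (hprevD _ hk0).mpr (by rw [← hjk]; exact hcj)⟩
          · rintro ⟨hk0, h⟩
            obtain ⟨t', ht'⟩ := htop hk0 ((hprevD _ hk0).mp h)
            rw [hst] at ht'
            have hx' : x = ((k - 1 : Nat) : Int) := (List.cons.injEq _ _ _ _).mp ht' |>.1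
            rw [hst]; simp only [List.headD_cons, hx']; omega
        have hrec := fun res => ih (k + 1) t res hdrop'
          (by
            rw [hst] at hcount
            subst hc2
            simp [htake, List.count_append]
            simp at hcount
            omega)
          (by
            intro y hy
            obtain ⟨j', hj', hyj', hcj'⟩ := hmem y (by rw [hst]; exact List.mem_cons_of_mem _ hy)
            exact ⟨j', by omega, hyj', hcj'⟩)
          (by
            intro _ hcon
            rw [Nat.add_sub_cancel, hck] at hcon
            have := Option.some.inj hcon
            rw [hc2] at this
            exact absurd this (by decide))
        rw [hst] at hbr
        rw [hst]
        by_cases hlaser : (k : Int) - ((x :: t) : List Int).headD 0 = 1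
        · -- laser: A adds len(stack after pop) = t.length; B's piece is the prefix balance - 1
          have hb := hbr.mp hlaser
          have hpz : pieceB cs k = (t.length : Int) := by
            rw [hst] at hcount
            simp only [List.length_cons] at hcount
            have : ((cs.take k).count '(' : Int) - ((cs.take k).count ')' : Int) - 1
                = (t.length : Int) := by push_cast [← hcount]; ring
            have hb2 : cs[k - 1]?.getD ' ' = '(' := hb.2
            simp [pieceB, List.getD, hck, hc2, hb.1, hb2, this]
          rw [if_pos hlaser, hpz]
          simp only [List.tail_cons]
          rw [hrec (result + (t.length : Int))]; ring
        · -- plain stick end: both add 1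
          have hb : ¬ (0 < k ∧ cs.getD (k - 1) ' ' = '(') := fun h => hlaser (hbr.mpr h)
          have hpz : pieceB cs k = 1 := by
            have hb' : ¬ (0 < k ∧ cs[k - 1]?.getD ' ' = '(') := hb
            simp [pieceB, List.getD, hck, hc2, hb']
          rw [if_neg hlaser, hpz]
          simp only [List.tail_cons]
          rw [hrec (result + 1)]; ring
      · -- other character: contributes 0, state unchanged
        have hpz : pieceB cs k = 0 := by
          simp [pieceB, List.getD, hck, hc2]
        rw [if_neg hc, if_neg hc2, hpz]
        rw [ih (k + 1) stack result hdrop'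
          (by simp [htake, List.count_append, hc, hc2, hcount])
          (by intro y hy; obtain ⟨j, hj, hyj, hcj⟩ := hmem y hy; exact ⟨j, by omega, hyj, hcj⟩)
          (by
            intro _ hcon
            rw [Nat.add_sub_cancel, hck] at hcon
            exact absurd (Option.some.inj hcon) hc)]
        ring

-- ===== VERDICT (by name: the statement is the Claim_ definition above) =====
theorem get_stick_num_spec : Claim_equal_get_stick_num := by
  intro s _ hpre
  unfold Spec_get_stick_num get_stick_num get_stick_num_alt
  have h := loop_eq s.toList hpre s.toList 0 [] 0 rfl (by simp) (by simp) (by omega)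
  simpa [List.range_eq_range'] using h
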